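-- pv_equiv track=rewrite | github.com/RobertoAlvarez94/DataStructuresAndAlgorithms | Assignment3.py | check_double
-- ===== SOURCE A (Python) =====
-- def check_double(list1, list2):
--     new_list=[]
--     multi_list = [i * 2 for i in list2] #this iterates thru list
--
--     #iterate thru all elements of both lists for comparison
--     for i in range(0, len(list2)):
--       for j in range(0, len(list1)):
--         if list1[j] == multi_list[i]:
--           new_list.append(list1[j])
--     return new_list
-- ===== SOURCE B (Python) =====
-- def check_double(list1, list2):
--     counts = {}
--     for x in list1:
--         counts[x] = counts.get(x, 0) + 1
--     out = []
--     for y in list2: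
--         out += [2 * y] * counts.get(2 * y, 0)
--     return out
-- ===== Notes on version B (the rewrite author's own statement) =====
-- stated objective: faster
-- what changed: Replaces the nested scan (for each list2 element, rescan all of list1) by a one-pass occurrence counter over list1 and a single lookup per list2 element, emitting the doubled value repeated count times.
import Mathlib
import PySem

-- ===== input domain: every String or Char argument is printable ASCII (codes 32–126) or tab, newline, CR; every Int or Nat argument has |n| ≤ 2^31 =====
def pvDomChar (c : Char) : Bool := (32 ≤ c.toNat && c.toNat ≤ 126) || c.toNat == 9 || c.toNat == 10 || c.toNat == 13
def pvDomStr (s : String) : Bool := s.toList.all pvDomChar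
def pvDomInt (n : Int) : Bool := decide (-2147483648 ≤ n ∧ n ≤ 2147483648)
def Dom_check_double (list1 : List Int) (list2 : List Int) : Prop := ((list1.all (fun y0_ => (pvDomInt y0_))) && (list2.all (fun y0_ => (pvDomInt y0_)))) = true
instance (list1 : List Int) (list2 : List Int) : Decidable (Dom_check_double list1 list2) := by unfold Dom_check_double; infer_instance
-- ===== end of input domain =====

-- B replaces A's nested rescans of list1 by a one-pass occurrence counter and one lookup per list2 element (objective: faster).

-- ===== PORT A =====
def check_double (list1 : List Int) (list2 : List Int) : List Int :=
  let multi_list := list2.map (fun i => i * 2)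
  (PySem.List.pyRange 0 (PySem.List.len list2)).foldl (fun new_list i =>
    (PySem.List.pyRange 0 (PySem.List.len list1)).foldl (fun nl j =>
      if PySem.List.pyGetD list1 j 0 = PySem.List.pyGetD multi_list i 0
      then nl ++ [PySem.List.pyGetD list1 j 0] else nl) new_list) []

-- ===== PORT B =====
def check_double_alt (list1 : List Int) (list2 : List Int) : List Int :=
  let counts := list1.foldl (fun d x => d.modify x 0 (fun c => c + 1))
    (PySem.Dict.empty : PySem.Dict Int Int)
  list2.foldl (fun out y => out ++ List.replicate (counts.getD (2 * y) 0).toNat (2 * y)) []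

-- ===== PRECONDITION & SPEC =====
def Spec_check_double (list1 : List Int) (list2 : List Int) (out : List Int) : Prop := out = check_double_alt list1 list2
instance (list1 : List Int) (list2 : List Int) (out : List Int) : Decidable (Spec_check_double list1 list2 out) := by unfold Spec_check_double; infer_instance

-- ===== CLAIM (what is proved, stated in full; the proofs are below) =====
def Claim_equal_check_double : Prop := ∀ (list1 : List Int) (list2 : List Int), Dom_check_double list1 list2 → Spec_check_double list1 list2 (check_double list1 list2)

-- ===== LEMMAS AND PROOFS =====

-- A's inner scan of list1 for value c collects exactly count-many copies of c.
theorem inner_filter (c : Int) (l1 acc : List Int) :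
    l1.foldl (fun nl x => if x = c then nl ++ [x] else nl) acc
      = acc ++ List.replicate (l1.count c) c := by
  induction l1 generalizing acc with
  | nil => simp
  | cons a t ih =>
    by_cases h : a = c
    · subst h
      simp [List.foldl_cons, ih, List.replicate_succ]
    · simp [List.foldl_cons, ih, h]

-- ===== VERDICT (by name: the statement is the Claim_ definition above) =====
theorem check_double_spec : Claim_equal_check_double := by
  intro l1 l2 _
  unfold Spec_check_double check_double check_double_alt
  rw [show PySem.List.len l2 = PySem.List.len (l2.map (fun i => i * 2)) by simp [PySem.List.len]]
  rw [PySem.List.foldl_pyRange_pyGetD (l2.map (fun i => i * 2)) 0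
        (fun acc c => (PySem.List.pyRange 0 (PySem.List.len l1)).foldl (fun nl j =>
          if PySem.List.pyGetD l1 j 0 = c then nl ++ [PySem.List.pyGetD l1 j 0] else nl) acc) [] le_rfl]
  simp only [Int.toNat_zero, List.drop_zero, List.foldl_map]
  congr 1
  funext acc y
  rw [PySem.List.foldl_pyRange_pyGetD l1 0
        (fun nl x => if x = y * 2 then nl ++ [x] else nl) acc le_rfl]
  simp only [Int.toNat_zero, List.drop_zero]
  rw [inner_filter]
  rw [PySem.Dict.getD_foldl_modify_add_one]
  simp [mul_comm]
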